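-- pv_equiv track=rewrite | github.com/sth-s/atmio | utils/extractors.py | prioritize_contacts
-- ===== SOURCE A (Python) =====
-- from typing import Optional
--
-- def prioritize_contacts(contacts: list[dict]) -> Optional[dict]:
--     """Select best contact based on priority: sales > manager > general."""
--     if not contacts:
--         return None
--
--     priority_order = ['sales', 'management', 'general', 'unknown', 'support']
--
--     for priority in priority_order:
--         for contact in contacts:
--             if contact.get('type') == priority:
--                 return contact
--
--     return contacts[0] if contacts else None
-- ===== SOURCE B (Python) =====
-- def prioritize_contacts(contacts):
--     """Select best contact: single pass keeping the first contact of smallest priority rank."""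
--     if not contacts:
--         return None
--
--     priority_order = ['sales', 'management', 'general', 'unknown', 'support']
--     rank = {name: i for i, name in enumerate(priority_order)}
--
--     best = None
--     best_rank = len(priority_order)
--     for contact in contacts:
--         r = rank.get(contact.get('type'))
--         if r is not None and r < best_rank:
--             best, best_rank = contact, r
--     return best if best is not None else contacts[0]
-- ===== Notes on version B (the rewrite author's own statement) =====
-- stated objective: alternative
-- what changed: Replaces the nested loop over priorities x contacts with a precomputed name-to-rank dict and one pass over the contacts keeping the first contact of strictly smallest rank.
import Mathlib
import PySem

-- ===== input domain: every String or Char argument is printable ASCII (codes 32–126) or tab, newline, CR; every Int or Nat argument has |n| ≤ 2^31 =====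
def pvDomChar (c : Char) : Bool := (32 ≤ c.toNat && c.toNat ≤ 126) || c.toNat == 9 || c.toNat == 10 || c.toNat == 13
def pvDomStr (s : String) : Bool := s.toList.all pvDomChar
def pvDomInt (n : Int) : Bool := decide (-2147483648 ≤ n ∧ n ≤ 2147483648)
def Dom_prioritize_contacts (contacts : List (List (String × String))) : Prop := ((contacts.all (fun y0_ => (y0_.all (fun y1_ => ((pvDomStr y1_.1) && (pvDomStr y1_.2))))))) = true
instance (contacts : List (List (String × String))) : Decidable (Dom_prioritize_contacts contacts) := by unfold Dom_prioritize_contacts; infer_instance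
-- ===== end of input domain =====

-- B replaces A's nested priorities×contacts scan by a rank dictionary and ONE pass over the
-- contacts keeping the first contact of strictly smallest rank (objective: alternative single-pass algorithm).
-- Neither version mutates its argument.

-- ===== PORT A =====
-- the fixed priority list of A (and of B)
def pvPriority : List String := ["sales", "management", "general", "unknown", "support"]

-- 'for priority in priority_order: for contact in contacts: if contact.get("type") == priority: return contact'
def pvGoA (ps : List String) (contacts : List (List (String × String))) : Option (List (String × String)) :=
  match ps with
  | [] => none
  | p :: ps' =>
    match contacts.find? (fun contact => (PySem.Dict.ofList contact).get? "type" == some p) with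
    | some c => some c
    | none => pvGoA ps' contacts

def prioritize_contacts (contacts : List (List (String × String))) : Option (List (String × String)) :=
  match contacts with
  | [] => none                               -- if not contacts: return None
  | c0 :: _ =>
    match pvGoA pvPriority contacts with
    | some c => some c                       -- early return from the nested loops
    | none => some c0                        -- return contacts[0] if contacts else None

-- ===== PORT B =====
def prioritize_contacts_alt (contacts : List (List (String × String))) : Option (List (String × String)) :=
  match contacts with
  | [] => none                               -- if not contacts: return None
  | c0 :: _ =>
    -- rank = {name: i for i, name in enumerate(priority_order)}
    let rank : PySem.Dict String Int :=
      (PySem.List.enumerate pvPriority).foldl (fun d p => d.insert p.2 p.1) PySem.Dict.empty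
    -- one pass: best, best_rank
    let res : Option (List (String × String)) × Int :=
      contacts.foldl
        (fun st contact =>
          -- r = rank.get(contact.get('type')); a None 'type' is never a dict key, so it looks up to None
          let r : Option Int :=
            match (PySem.Dict.ofList contact).get? "type" with
            | some t => rank.get? t
            | none => none
          match r with
          | some rv => if rv < st.2 then (some contact, rv) else st
          | none => st)
        (none, (5 : Int))                    -- best = None, best_rank = len(priority_order)
    match res.1 with
    | some b => some b                       -- return best if best is not None
    | none => some c0                        -- else contacts[0]

-- ===== PRECONDITION & SPEC =====
def Spec_prioritize_contacts (contacts : List (List (String × String))) (out : Option (List (String × String))) : Prop := out = prioritize_contacts_alt contacts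
instance (contacts : List (List (String × String))) (out : Option (List (String × String))) : Decidable (Spec_prioritize_contacts contacts out) := by unfold Spec_prioritize_contacts; infer_instance

-- ===== CLAIM (what is proved, stated in full; the proofs are below) =====
def Claim_equal_prioritize_contacts : Prop := ∀ (contacts : List (List (String × String))), Dom_prioritize_contacts contacts → Spec_prioritize_contacts contacts (prioritize_contacts contacts)

-- ===== LEMMAS AND PROOFS =====

-- the rank of a contact w.r.t. a priority list: index of its 'type' value, length if absent
def pvRk (ps : List String) (c : List (String × String)) : Nat :=
  ps.findIdx (fun p => (PySem.Dict.ofList c).get? "type" == some p)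

-- 'first argmin below threshold r', the common characterisation of both programs' choice
def pvPick (ps : List String) (r : Nat) (cs : List (List (String × String))) : Option (List (String × String)) :=
  match cs with
  | [] => none
  | c :: cs' => if pvRk ps c < r then some ((pvPick ps (pvRk ps c) cs').getD c) else pvPick ps r cs'

theorem pvPick_zero (ps : List String) (cs : List (List (String × String))) :
    pvPick ps 0 cs = none := by
  induction cs with
  | nil => rfl
  | cons c cs ih => simp [pvPick, ih]

theorem pvPick_cons (p : String) (ps : List String) (r : Nat) (cs : List (List (String × String))) :
    pvPick (p :: ps) (r + 1) cs =
      (cs.find? (fun c => (PySem.Dict.ofList c).get? "type" == some p)).orElse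
        (fun _ => pvPick ps r cs) := by
  induction cs generalizing r with
  | nil => rfl
  | cons c cs ih =>
    by_cases hp : ((PySem.Dict.ofList c).get? "type" == some p) = true
    · simp [pvPick, pvRk, List.findIdx_cons, hp, pvPick_zero, Option.orElse]
    · have hrk : pvRk (p :: ps) c = pvRk ps c + 1 := by
        simp [pvRk, List.findIdx_cons, hp]
      rw [List.find?_cons_of_neg (by simpa using hp)]
      by_cases hlt : pvRk ps c < r
      · rw [show pvPick (p :: ps) (r+1) (c :: cs) = some ((pvPick (p :: ps) (pvRk ps c + 1) cs).getD c) by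
              simp [pvPick, hrk, hlt]]
        rw [ih]
        simp only [pvPick, hlt, if_pos]
        cases hf : cs.find? (fun c => (PySem.Dict.ofList c).get? "type" == some p) <;>
          simp [Option.orElse]
      · rw [show pvPick (p :: ps) (r+1) (c :: cs) = pvPick (p :: ps) (r+1) cs by
              simp [pvPick, hrk, hlt]]
        rw [ih]
        simp [pvPick, hlt]

theorem pvGoA_eq_pick (ps : List String) (cs : List (List (String × String))) :
    pvGoA ps cs = pvPick ps ps.length cs := by
  induction ps with
  | nil => simp [pvGoA, pvPick_zero]
  | cons p ps ih =>
    rw [show (p :: ps).length = ps.length + 1 from rfl, pvPick_cons]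
    cases hf : cs.find? (fun c => (PySem.Dict.ofList c).get? "type" == some p) <;>
      simp [pvGoA, hf, Option.orElse, ih]

-- B's rank lookup in terms of pvRk
theorem pvRank_lookup (c : List (String × String)) :
    (match (PySem.Dict.ofList c).get? "type" with
      | some t => ((PySem.List.enumerate pvPriority).foldl
          (fun d (p : Int × String) => d.insert p.2 p.1) PySem.Dict.empty).get? t
      | none => none) =
    (if pvRk pvPriority c < 5 then some ((pvRk pvPriority c : Int)) else none) := by
  cases ht : (PySem.Dict.ofList c).get? "type" with
  | none => simp [pvRk, pvPriority, List.findIdx, List.findIdx.go, ht]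
  | some t =>
    have e : ((PySem.List.enumerate pvPriority).foldl
        (fun d (p : Int × String) => d.insert p.2 p.1) PySem.Dict.empty) =
        PySem.Dict.mk [("sales", 0), ("management", 1), ("general", 2), ("unknown", 3), ("support", 4)] := by
      decide
    simp only [pvRk, pvPriority, ht]
    by_cases h0 : t = "sales"
    · subst h0; decide
    · by_cases h1 : t = "management"
      · subst h1; decide
      · by_cases h2 : t = "general"
        · subst h2; decide
        · by_cases h3 : t = "unknown"
          · subst h3; decide
          · by_cases h4 : t = "support"
            · subst h4; decide
            · have b0 : (t == "sales") = false := by rw [beq_eq_false_iff_ne]; exact h0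
              have b1 : (t == "management") = false := by rw [beq_eq_false_iff_ne]; exact h1
              have b2 : (t == "general") = false := by rw [beq_eq_false_iff_ne]; exact h2
              have b3 : (t == "unknown") = false := by rw [beq_eq_false_iff_ne]; exact h3
              have b4 : (t == "support") = false := by rw [beq_eq_false_iff_ne]; exact h4
              have c0 : ("sales" == t) = false := by rw [beq_eq_false_iff_ne]; exact fun h => h0 h.symm
              have c1 : ("management" == t) = false := by rw [beq_eq_false_iff_ne]; exact fun h => h1 h.symm
              have c2 : ("general" == t) = false := by rw [beq_eq_false_iff_ne]; exact fun h => h2 h.symm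
              have c3 : ("unknown" == t) = false := by rw [beq_eq_false_iff_ne]; exact fun h => h3 h.symm
              have c4 : ("support" == t) = false := by rw [beq_eq_false_iff_ne]; exact fun h => h4 h.symm
              simp [PySem.Dict.get?, PySem.Dict.insert, PySem.Dict.empty, List.findIdx_cons,
                b0, b1, b2, b3, b4, c0, c1, c2, c3, c4]

-- the fold of B computes pvPick
theorem pvFold_eq_pick (cs : List (List (String × String)))
    (b : Option (List (String × String))) (r : Nat) (hr : r ≤ 5) :
    (cs.foldl
        (fun st contact =>
          let rv : Option Int :=
            match (PySem.Dict.ofList contact).get? "type" with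
            | some t => (((PySem.List.enumerate pvPriority).foldl
                (fun d (p : Int × String) => d.insert p.2 p.1) PySem.Dict.empty)).get? t
            | none => none
          match rv with
          | some rv => if rv < st.2 then (some contact, rv) else st
          | none => st)
        (b, (r : Int))).1 =
      (pvPick pvPriority r cs).orElse (fun _ => b) := by
  induction cs generalizing b r with
  | nil => simp [pvPick, Option.orElse]
  | cons c cs ih =>
    rw [List.foldl_cons]
    simp only [pvRank_lookup c]
    by_cases h5 : pvRk pvPriority c < 5
    · simp only [h5, if_pos]
      by_cases hlt : pvRk pvPriority c < r
      · have hc : ((pvRk pvPriority c : Int) < (r : Int)) := by exact_mod_cast hlt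
        simp only [hc, if_pos]
        rw [ih (some c) (pvRk pvPriority c) (le_of_lt h5)]
        simp only [pvPick, hlt, if_pos]
        cases hf : pvPick pvPriority (pvRk pvPriority c) cs <;> simp [Option.orElse]
      · have hc : ¬ ((pvRk pvPriority c : Int) < (r : Int)) := by exact_mod_cast hlt
        simp only [hc, if_neg, not_false_iff]
        rw [ih b r hr]
        simp [pvPick, hlt]
    · simp only [h5, if_neg, not_false_iff]
      rw [ih b r hr]
      have hlt : ¬ pvRk pvPriority c < r := fun h => h5 (lt_of_lt_of_le h (by omega))
      simp [pvPick, hlt]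

-- ===== VERDICT (by name: the statement is the Claim_ definition above) =====
theorem prioritize_contacts_spec : Claim_equal_prioritize_contacts := by
  intro contacts _
  unfold Spec_prioritize_contacts
  cases contacts with
  | nil => rfl
  | cons c0 rest =>
    simp only [prioritize_contacts, prioritize_contacts_alt]
    rw [pvGoA_eq_pick]
    have h5 : pvPriority.length = 5 := rfl
    rw [h5]
    have := pvFold_eq_pick (c0 :: rest) none 5 (le_refl 5)
    simp only [Nat.cast_ofNat] at this
    rw [this]
    cases pvPick pvPriority 5 (c0 :: rest) <;> simp [Option.orElse]
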